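-- pv_equiv track=rewrite | github.com/manukrishna804/cw3 | app.py | recognize_sign
-- ===== SOURCE A (Python) =====
-- sign_patterns = {
--     "A": [1, 0, 0, 0, 0],  # Thumb only
--     "B": [0, 1, 1, 1, 1],  # Four fingers up
--     "C": [1, 1, 1, 0, 0],  # Thumb, index, middle
--     "D": [0, 1, 0, 0, 0],  # Index finger only
--     "E": [0, 0, 0, 0, 0],  # Closed fist
--     "F": [1, 0, 1, 1, 1],  # Thumb, middle, ring, pinky
--     "G": [1, 1, 0, 0, 0],  # Thumb and index
--     "H": [0, 1, 1, 0, 0],  # Index and middle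
--     "I": [0, 0, 0, 0, 1],  # Pinky only
--     "J": [0, 0, 0, 1, 0],  # Ring finger only
--     "K": [0, 1, 1, 1, 0],  # Index, middle, ring
--     "L": [1, 1, 0, 0, 0],  # Thumb and index (L shape)
--     "M": [1, 0, 1, 0, 1],  # Thumb, middle, pinky
--     "N": [1, 0, 0, 1, 0],  # Thumb and ring
--     "O": [1, 1, 1, 1, 1],  # All fingers (circle shape)
--     "P": [1, 1, 1, 0, 1],  # Thumb, index, middle, pinky
--     "Q": [1, 0, 1, 1, 0],  # Thumb, middle, ring
--     "R": [0, 1, 1, 0, 1],  # Index, middle, pinky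
--     "S": [0, 0, 0, 0, 0],  # Same as E - closed fist
--     "T": [1, 0, 0, 0, 1],  # Thumb and pinky
--     "U": [0, 1, 1, 0, 0],  # Index and middle together
--     "V": [0, 1, 1, 0, 0],  # Same as U - peace sign
--     "W": [0, 1, 1, 1, 0],  # Three fingers up
--     "X": [0, 1, 0, 1, 0],  # Index and ring
--     "Y": [1, 0, 0, 0, 1],  # Thumb and pinky (hang loose)
--     "Z": [0, 0, 1, 0, 0],  # Middle finger only
-- }
--
-- SPACE_GESTURE = [1, 1, 1, 1, 0]  # Four fingers, no pinky (for word separation)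
--
-- DELETE_GESTURE = [1, 0, 0, 0, 0]  # Only thumb (backspace)
--
-- FINISH_GESTURE = [1, 1, 1, 1, 1]  # All fingers (finish word)
--
-- number_patterns = {
--     "0": [0, 0, 0, 0, 0],  # Closed fist
--     "1": [0, 1, 0, 0, 0],  # Index finger only
--     "2": [0, 1, 1, 0, 0],  # Index and middle
--     "3": [0, 1, 1, 1, 0],  # Index, middle, ring
--     "4": [0, 1, 1, 1, 1],  # Four fingers
--     "5": [1, 1, 1, 1, 1],  # All fingers
--     "6": [1, 0, 0, 0, 0],  # Thumb only
--     "7": [1, 1, 0, 0, 0],  # Thumb and index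
--     "8": [1, 1, 1, 0, 0],  # Thumb, index, middle
--     "9": [1, 1, 1, 1, 0],  # Thumb, index, middle, ring
-- }
--
-- mannerism_patterns = {
--     "HELLO": [1, 1, 0, 0, 0],  # Thumb and index (wave)
--     "THANK YOU": [1, 0, 0, 0, 0],  # Thumb up
--     "PLEASE": [1, 1, 1, 0, 0],  # Three fingers
--     "GOOD": [1, 1, 0, 0, 0],  # Thumb and index
--     "BAD": [0, 0, 0, 0, 0],  # Closed fist
--     "YES": [1, 1, 1, 1, 1],  # All fingers
--     "NO": [0, 0, 0, 0, 0],  # Closed fist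
--     "SORRY": [1, 0, 0, 0, 1],  # Thumb and pinky
-- }
--
-- def recognize_sign(fingers):
--     """Recognize sign from finger pattern"""
--     # Check alphabet patterns
--     for letter, pattern in sign_patterns.items():
--         if fingers == pattern:
--             return letter, 'alphabet'
--
--     # Check number patterns
--     for number, pattern in number_patterns.items():
--         if fingers == pattern:
--             return number, 'number'
--
--     # Check mannerism patterns
--     for mannerism, pattern in mannerism_patterns.items():
--         if fingers == pattern:
--             return mannerism, 'mannerism'
--
--     # Check special gestures
--     if fingers == SPACE_GESTURE:
--         return 'SPACE', 'special'
--     if fingers == DELETE_GESTURE: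
--         return 'DELETE', 'special'
--     if fingers == FINISH_GESTURE:
--         return 'FINISH', 'special'
--
--     return None, None
-- ===== SOURCE B (Python) =====
-- # B: encode the 5-finger binary pattern as an integer 0..31 (thumb = bit 0)
-- # and read the answer from a flat 32-entry table; anything that is not a
-- # 5-element 0/1 list can match no pattern, so it is (None, None) directly.
-- _TABLE = [
--     ("E", "alphabet"),   # 0  [0,0,0,0,0]
--     ("A", "alphabet"),   # 1  [1,0,0,0,0]
--     ("D", "alphabet"),   # 2  [0,1,0,0,0]
--     ("G", "alphabet"),   # 3  [1,1,0,0,0]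
--     ("Z", "alphabet"),   # 4  [0,0,1,0,0]
--     (None, None),        # 5
--     ("H", "alphabet"),   # 6  [0,1,1,0,0]
--     ("C", "alphabet"),   # 7  [1,1,1,0,0]
--     ("J", "alphabet"),   # 8  [0,0,0,1,0]
--     ("N", "alphabet"),   # 9  [1,0,0,1,0]
--     ("X", "alphabet"),   # 10 [0,1,0,1,0]
--     (None, None),        # 11
--     (None, None),        # 12
--     ("Q", "alphabet"),   # 13 [1,0,1,1,0]
--     ("K", "alphabet"),   # 14 [0,1,1,1,0]
--     ("9", "number"),     # 15 [1,1,1,1,0]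
--     ("I", "alphabet"),   # 16 [0,0,0,0,1]
--     ("T", "alphabet"),   # 17 [1,0,0,0,1]
--     (None, None),        # 18
--     (None, None),        # 19
--     (None, None),        # 20
--     ("M", "alphabet"),   # 21 [1,0,1,0,1]
--     ("R", "alphabet"),   # 22 [0,1,1,0,1]
--     ("P", "alphabet"),   # 23 [1,1,1,0,1]
--     (None, None),        # 24
--     (None, None),        # 25
--     (None, None),        # 26
--     (None, None),        # 27
--     (None, None),        # 28
--     ("F", "alphabet"),   # 29 [1,0,1,1,1]
--     ("B", "alphabet"),   # 30 [0,1,1,1,1]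
--     ("O", "alphabet"),   # 31 [1,1,1,1,1]
-- ]
--
-- def recognize_sign(fingers):
--     """Recognize sign from finger pattern"""
--     if len(fingers) == 5 and all(f == 0 or f == 1 for f in fingers):
--         code = 0
--         for f in reversed(fingers):
--             code = 2 * code + f
--         return _TABLE[code]
--     return (None, None)
-- ===== Notes on version B (the rewrite author's own statement) =====
-- stated objective: alternative
-- what changed: B replaces A's three sequential dict scans plus three special-gesture branches with an arithmetic encoding: a 5-element 0/1 list is turned into a bitmask 0..31 and the answer is read from one flat 32-entry table; any other input returns (None, None) directly.
import Mathlib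
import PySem

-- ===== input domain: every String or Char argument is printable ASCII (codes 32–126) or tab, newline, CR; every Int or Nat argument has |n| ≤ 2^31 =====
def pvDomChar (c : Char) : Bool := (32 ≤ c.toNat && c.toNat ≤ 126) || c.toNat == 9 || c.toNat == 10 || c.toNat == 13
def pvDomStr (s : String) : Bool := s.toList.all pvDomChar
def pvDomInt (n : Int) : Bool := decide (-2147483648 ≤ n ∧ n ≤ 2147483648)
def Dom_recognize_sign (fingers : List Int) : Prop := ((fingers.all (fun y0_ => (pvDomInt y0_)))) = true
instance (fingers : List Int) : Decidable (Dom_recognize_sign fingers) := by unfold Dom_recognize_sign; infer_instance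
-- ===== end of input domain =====

-- B re-encodes a 5-element 0/1 finger list as an index 0..31 (thumb = bit 0) and reads a
-- flat 32-entry table, instead of A's three sequential dict scans plus three branches.

-- ===== PORT A =====
def pvSigns : List (String × List Int) :=
  [("A", [1, 0, 0, 0, 0]), ("B", [0, 1, 1, 1, 1]), ("C", [1, 1, 1, 0, 0]),
   ("D", [0, 1, 0, 0, 0]), ("E", [0, 0, 0, 0, 0]), ("F", [1, 0, 1, 1, 1]),
   ("G", [1, 1, 0, 0, 0]), ("H", [0, 1, 1, 0, 0]), ("I", [0, 0, 0, 0, 1]),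
   ("J", [0, 0, 0, 1, 0]), ("K", [0, 1, 1, 1, 0]), ("L", [1, 1, 0, 0, 0]),
   ("M", [1, 0, 1, 0, 1]), ("N", [1, 0, 0, 1, 0]), ("O", [1, 1, 1, 1, 1]),
   ("P", [1, 1, 1, 0, 1]), ("Q", [1, 0, 1, 1, 0]), ("R", [0, 1, 1, 0, 1]),
   ("S", [0, 0, 0, 0, 0]), ("T", [1, 0, 0, 0, 1]), ("U", [0, 1, 1, 0, 0]),
   ("V", [0, 1, 1, 0, 0]), ("W", [0, 1, 1, 1, 0]), ("X", [0, 1, 0, 1, 0]),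
   ("Y", [1, 0, 0, 0, 1]), ("Z", [0, 0, 1, 0, 0])]

def pvNumbers : List (String × List Int) :=
  [("0", [0, 0, 0, 0, 0]), ("1", [0, 1, 0, 0, 0]), ("2", [0, 1, 1, 0, 0]),
   ("3", [0, 1, 1, 1, 0]), ("4", [0, 1, 1, 1, 1]), ("5", [1, 1, 1, 1, 1]),
   ("6", [1, 0, 0, 0, 0]), ("7", [1, 1, 0, 0, 0]), ("8", [1, 1, 1, 0, 0]),
   ("9", [1, 1, 1, 1, 0])]

def pvMannerisms : List (String × List Int) :=
  [("HELLO", [1, 1, 0, 0, 0]), ("THANK YOU", [1, 0, 0, 0, 0]),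
   ("PLEASE", [1, 1, 1, 0, 0]), ("GOOD", [1, 1, 0, 0, 0]),
   ("BAD", [0, 0, 0, 0, 0]), ("YES", [1, 1, 1, 1, 1]),
   ("NO", [0, 0, 0, 0, 0]), ("SORRY", [1, 0, 0, 0, 1])]

-- the 'for name, pattern in d.items(): if fingers == pattern: return name' loop
def pvScanA (fingers : List Int) : List (String × List Int) → Option String
  | [] => none
  | (name, pat) :: rest => if fingers = pat then some name else pvScanA fingers rest

def recognize_sign (fingers : List Int) : Option String × Option String :=
  match pvScanA fingers pvSigns with
  | some l => (some l, some "alphabet")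
  | none =>
    match pvScanA fingers pvNumbers with
    | some n => (some n, some "number")
    | none =>
      match pvScanA fingers pvMannerisms with
      | some m => (some m, some "mannerism")
      | none =>
        if fingers = [1, 1, 1, 1, 0] then (some "SPACE", some "special")
        else if fingers = [1, 0, 0, 0, 0] then (some "DELETE", some "special")
        else if fingers = [1, 1, 1, 1, 1] then (some "FINISH", some "special")
        else (none, none)

-- ===== PORT B =====
-- Source B's flat 32-entry table, index = bitmask of the pattern (thumb = bit 0)
def pvTable : List (Option String × Option String) :=
  [(some "E", some "alphabet"), (some "A", some "alphabet"), (some "D", some "alphabet"),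
   (some "G", some "alphabet"), (some "Z", some "alphabet"), (none, none),
   (some "H", some "alphabet"), (some "C", some "alphabet"), (some "J", some "alphabet"),
   (some "N", some "alphabet"), (some "X", some "alphabet"), (none, none),
   (none, none), (some "Q", some "alphabet"), (some "K", some "alphabet"),
   (some "9", some "number"), (some "I", some "alphabet"), (some "T", some "alphabet"),
   (none, none), (none, none), (none, none),
   (some "M", some "alphabet"), (some "R", some "alphabet"), (some "P", some "alphabet"),
   (none, none), (none, none), (none, none), (none, none), (none, none),
   (some "F", some "alphabet"), (some "B", some "alphabet"), (some "O", some "alphabet")]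

def recognize_sign_alt (fingers : List Int) : Option String × Option String :=
  if fingers.length = 5 ∧ fingers.all (fun f => f == 0 || f == 1) then
    -- code = 0; for f in reversed(fingers): code = 2*code + f
    let code := fingers.reverse.foldl (fun c f => 2 * c + f) 0
    -- _TABLE[code]: the guard guarantees 0 ≤ code < 32, so the access is in range
    (PySem.List.pyGet? pvTable code).getD (none, none)
  else (none, none)

-- ===== PRECONDITION & SPEC =====
def Spec_recognize_sign (fingers : List Int) (out : Option String × Option String) : Prop := out = recognize_sign_alt fingers
instance (fingers : List Int) (out : Option String × Option String) : Decidable (Spec_recognize_sign fingers out) := by unfold Spec_recognize_sign; infer_instance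

-- ===== CLAIM (what is proved, stated in full; the proofs are below) =====
def Claim_equal_recognize_sign : Prop := ∀ (fingers : List Int), Dom_recognize_sign fingers → Spec_recognize_sign fingers (recognize_sign fingers)

-- ===== LEMMAS AND PROOFS =====
set_option maxRecDepth 100000
set_option maxHeartbeats 2000000

theorem int_trichot (x : Int) : x = 0 ∨ x = 1 ∨ (x ≠ 0 ∧ x ≠ 1) := by omega

-- ===== VERDICT (by name: the statement is the Claim_ definition above) =====
theorem recognize_sign_spec : Claim_equal_recognize_sign := by
  intro fingers _
  unfold Spec_recognize_sign
  rcases fingers with _ | ⟨a, _ | ⟨b, _ | ⟨c, _ | ⟨d, _ | ⟨e, _ | ⟨f, rest⟩⟩⟩⟩⟩⟩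
  case nil => decide
  case cons.nil => simp [recognize_sign, recognize_sign_alt, pvScanA, pvSigns, pvNumbers, pvMannerisms]
  case cons.cons.nil => simp [recognize_sign, recognize_sign_alt, pvScanA, pvSigns, pvNumbers, pvMannerisms]
  case cons.cons.cons.nil => simp [recognize_sign, recognize_sign_alt, pvScanA, pvSigns, pvNumbers, pvMannerisms]
  case cons.cons.cons.cons.nil => simp [recognize_sign, recognize_sign_alt, pvScanA, pvSigns, pvNumbers, pvMannerisms]
  case cons.cons.cons.cons.cons.cons =>
    simp [recognize_sign, recognize_sign_alt, pvScanA, pvSigns, pvNumbers, pvMannerisms]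
  case cons.cons.cons.cons.cons.nil =>
    rcases int_trichot a with rfl | rfl | ⟨ha0, ha1⟩ <;>
      rcases int_trichot b with rfl | rfl | ⟨hb0, hb1⟩ <;>
        rcases int_trichot c with rfl | rfl | ⟨hc0, hc1⟩ <;>
          rcases int_trichot d with rfl | rfl | ⟨hd0, hd1⟩ <;>
            rcases int_trichot e with rfl | rfl | ⟨he0, he1⟩ <;>
              first
                | decide
                | simp_all [recognize_sign, recognize_sign_alt, pvScanA, pvSigns,
                    pvNumbers, pvMannerisms]
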